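-- pv_equiv track=rewrite | github.com/ozdoganosman/svdfirebase000 | svd-ambalaj/scripts/extract_stock.py | chunk_product_groups
-- ===== SOURCE A (Python) =====
-- def chunk_product_groups(row: list[str], group_size: int = 4):
--     groups = []
--     for offset in range(0, len(row), group_size):
--         group = row[offset:offset + group_size]
--         if len(group) < group_size:
--             continue
--         if not any(group):
--             continue
--         groups.append((offset // group_size, group))
--     return groups
-- ===== SOURCE B (Python) =====
-- def chunk_product_groups(row: list[str], group_size: int = 4):
--     # Complete groups exist only when group_size <= len(row).
--     if group_size > len(row):
--         return []
--     # Chunk via the iterator idiom; the incomplete trailing group drops itself.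
--     return [(i, list(g))
--             for i, g in enumerate(zip(*[iter(row)] * group_size))
--             if any(g)]
-- ===== Notes on version B (the rewrite author's own statement) =====
-- stated objective: idiomatic
-- what changed: B replaces A's explicit offset loop with range/slice/length-test by the standard iterator-chunking idiom zip(*[iter(row)]*group_size), which yields only complete groups, then enumerates and filters them in a single comprehension.
import Mathlib
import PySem

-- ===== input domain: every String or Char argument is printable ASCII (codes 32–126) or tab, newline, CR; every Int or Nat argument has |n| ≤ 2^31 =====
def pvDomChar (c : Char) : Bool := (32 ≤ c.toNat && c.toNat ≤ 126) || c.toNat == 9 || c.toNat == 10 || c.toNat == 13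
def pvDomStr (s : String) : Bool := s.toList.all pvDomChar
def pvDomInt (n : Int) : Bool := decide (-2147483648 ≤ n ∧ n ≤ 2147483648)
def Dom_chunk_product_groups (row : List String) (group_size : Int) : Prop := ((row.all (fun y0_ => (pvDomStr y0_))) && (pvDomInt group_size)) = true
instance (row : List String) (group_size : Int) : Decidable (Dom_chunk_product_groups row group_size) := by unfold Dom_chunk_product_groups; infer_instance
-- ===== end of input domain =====

-- B chunks the row by the iterator idiom (complete groups only) and filters/enumerates in one
-- comprehension instead of A's explicit offset loop with slicing and a length test; objective: idiomatic.

-- ===== PORT A =====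
def chunk_product_groups (row : List String) (group_size : Int) : List (Int × List String) :=
  (PySem.List.pyRange 0 (row.length : Int) group_size).foldl
    (fun groups offset =>
      let group := PySem.List.slice row (some offset) (some (offset + group_size))
      if (group.length : Int) < group_size then groups
      else if !(group.any (fun s => s != "")) then groups
      else groups ++ [(PySem.Int.floordiv offset group_size, group)]) []

-- ===== PORT B =====
-- port of zip(*[iter(row)]*group_size): the list of consecutive complete chunks of size group_size
def pyChunks (n : Nat) (xs : List String) : List (List String) :=
  if _h : n = 0 ∨ xs.length < n then [] else xs.take n :: pyChunks n (xs.drop n)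
  termination_by xs.length
  decreasing_by simp; omega

def chunk_product_groups_alt (row : List String) (group_size : Int) : List (Int × List String) :=
  if (row.length : Int) < group_size then []
  else (PySem.List.enumerate (pyChunks group_size.toNat row)).filter
    (fun p => p.2.any (fun s => s != ""))

-- ===== PRECONDITION & SPEC =====
-- Pre_ excludes only group_size = 0, where A's range(0, len(row), 0) raises ValueError (B returns [] there).
def Pre_chunk_product_groups (row : List String) (group_size : Int) : Prop := group_size ≠ 0
instance (row : List String) (group_size : Int) : Decidable (Pre_chunk_product_groups row group_size) := by unfold Pre_chunk_product_groups; infer_instance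
def pvWitness_chunk_product_groups : List String × Int := (["a", "", "b"], 2)

def Spec_chunk_product_groups (row : List String) (group_size : Int) (out : List (Int × List String)) : Prop := out = chunk_product_groups_alt row group_size
instance (row : List String) (group_size : Int) (out : List (Int × List String)) : Decidable (Spec_chunk_product_groups row group_size out) := by unfold Spec_chunk_product_groups; infer_instance

-- ===== CLAIM (what is proved, stated in full; the proofs are below) =====
def Claim_equal_chunk_product_groups : Prop := ∀ (row : List String) (group_size : Int), Dom_chunk_product_groups row group_size → Pre_chunk_product_groups row group_size → Spec_chunk_product_groups row group_size (chunk_product_groups row group_size)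

-- ===== LEMMAS AND PROOFS =====

-- cons form of pyRange for an arbitrary positive step
lemma pyRange_pos_cons (a b s : Int) (hs : 0 < s) (h : a < b) :
    PySem.List.pyRange a b s = a :: PySem.List.pyRange (a + s) b s := by
  rw [PySem.List.pyRange_of_pos a b hs, PySem.List.pyRange_of_pos (a + s) b hs]
  have h3 := Int.add_mul_ediv_right (b - (a + s) + s - 1) 1 hs.ne'
  rw [one_mul] at h3
  by_cases h2 : a + s < b
  · have h1 : (0:Int) ≤ b - (a + s) + s - 1 := by omega
    have hc : (b - a + s - 1) / s = (b - (a + s) + s - 1) / s + 1 := by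
      rw [show b - a + s - 1 = b - (a + s) + s - 1 + s by ring, h3]
    have ht : ((b - (a + s) + s - 1) / s + 1).toNat = ((b - (a + s) + s - 1) / s).toNat + 1 := by
      have := Int.ediv_nonneg h1 hs.le; omega
    rw [if_pos h, if_pos h2, hc, ht, List.range_succ_eq_map, List.map_cons, List.map_map]
    refine List.cons_eq_cons.mpr ⟨by simp, ?_⟩
    apply List.map_congr_left
    intro k _
    simp only [Function.comp_def]
    push_cast; ring
  · -- a < b ≤ a + s : exactly one element left
    have h1a : (b - a - 1) / s = 0 := Int.ediv_eq_zero_of_lt (by omega) (by omega)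
    have h1 : (b - a + s - 1) / s = 1 := by
      have h4 := Int.add_mul_ediv_right (b - a - 1) 1 hs.ne'
      rw [one_mul] at h4
      rw [show b - a + s - 1 = b - a - 1 + s by ring, h4, h1a]
      omega
    rw [if_pos h, if_neg h2, h1]
    simp

lemma pyRange_pos_nil (a b s : Int) (hs : 0 < s) (h : b ≤ a) :
    PySem.List.pyRange a b s = [] := by
  rw [PySem.List.pyRange_of_pos a b hs, if_neg (by omega)]; simp

lemma pyChunks_nil {n : Nat} {xs : List String} (h : xs.length < n) : pyChunks n xs = [] := by
  rw [pyChunks]; simp [h]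
lemma pyChunks_zero (xs : List String) : pyChunks 0 xs = [] := by
  rw [pyChunks]; simp
lemma pyChunks_cons {n : Nat} {xs : List String} (hn : 0 < n) (h : n ≤ xs.length) :
    pyChunks n xs = xs.take n :: pyChunks n (xs.drop n) := by
  rw [pyChunks]; rw [dif_neg (by omega)]

-- the loop invariant: A's fold from offset k*n equals B's enumerate/filter of the chunks of the
-- remaining suffix, started at index k, appended to the accumulator
lemma loop (row : List String) (n : Nat) (hn : 0 < n) :
    ∀ (d k : Nat) (acc : List (Int × List String)), row.length - k * n ≤ d →
    (PySem.List.pyRange ((k * n : Nat) : Int) (row.length : Int) (n : Int)).foldl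
      (fun groups offset =>
        let group := PySem.List.slice row (some offset) (some (offset + (n : Int)))
        if (group.length : Int) < (n : Int) then groups
        else if !(group.any (fun s => s != "")) then groups
        else groups ++ [(PySem.Int.floordiv offset (n : Int), group)]) acc
    = acc ++ (PySem.List.enumerate (pyChunks n (row.drop (k * n))) (k : Int)).filter
        (fun p => p.2.any (fun s => s != "")) := by
  intro d
  induction d with
  | zero =>
      intro k acc h
      have hL : row.length ≤ k * n := by omega
      rw [pyRange_pos_nil _ _ _ (by exact_mod_cast hn) (by exact_mod_cast hL)]
      rw [pyChunks_nil (by simp; omega)]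
      simp [PySem.List.enumerate]
  | succ d ih =>
      intro k acc h
      by_cases hL : row.length ≤ k * n
      · rw [pyRange_pos_nil _ _ _ (by exact_mod_cast hn) (by exact_mod_cast hL)]
        rw [pyChunks_nil (by simp; omega)]
        simp [PySem.List.enumerate]
      · push_neg at hL
        rw [pyRange_pos_cons _ _ _ (by exact_mod_cast hn) (by exact_mod_cast hL)]
        rw [List.foldl_cons]
        have hrec : ((k * n : Nat) : Int) + (n : Int) = (((k + 1) * n : Nat) : Int) := by
          push_cast; ring
        rw [hrec]
        have hm : (k + 1) * n = k * n + n := by ring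
        by_cases hshort : row.length - k * n < n
        · -- short trailing group: A skips it and the range ends; B's chunks are empty
          have hnext : PySem.List.pyRange (((k + 1) * n : Nat) : Int) (row.length : Int) (n : Int) = [] := by
            apply pyRange_pos_nil _ _ _ (by exact_mod_cast hn)
            exact_mod_cast (by omega : row.length ≤ (k + 1) * n)
          rw [hnext, List.foldl_nil, pyChunks_nil (by simp; omega)]
          have hslice := PySem.List.slice_natCast_add row (k * n) n
          rw [hrec] at hslice
          simp only [hslice]
          rw [if_pos (by simp; push_cast; omega)]
          simp [PySem.List.enumerate]
        · push_neg at hshort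
          have hfuel : row.length - (k + 1) * n ≤ d := by omega
          have hslice := PySem.List.slice_natCast_add row (k * n) n
          rw [hrec] at hslice
          have hlong : ¬ ((((row.drop (k * n)).take n).length : Int) < (n : Int)) := by
            simp; push_cast; omega
          have hdrop : row.drop ((k + 1) * n) = (row.drop (k * n)).drop n := by
            rw [List.drop_drop, show k * n + n = (k + 1) * n by ring]
          have hdiv : PySem.Int.floordiv ((k * n : Nat) : Int) (n : Int) = (k : Int) := by
            unfold PySem.Int.floordiv
            push_cast
            rw [Int.mul_fdiv_cancel _ (by exact_mod_cast hn.ne')]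
          rw [pyChunks_cons hn (by simpa using hshort), PySem.List.enumerate_cons,
            List.filter_cons, ih (k + 1) _ hfuel, hdrop,
            show ((k + 1 : Nat) : Int) = (k : Int) + 1 by push_cast; ring]
          simp only [hslice, hdiv]
          rw [if_neg hlong]
          by_cases hany : ((row.drop (k * n)).take n).any (fun s => s != "")
          · rw [if_neg (by simp [hany])]
            simp [hany, List.append_assoc]
          · simp only [Bool.not_eq_true] at hany
            rw [if_pos (by simp [hany])]
            simp [hany]

-- ===== VERDICT (by name: the statement is the Claim_ definition above) =====
theorem chunk_product_groups_spec : Claim_equal_chunk_product_groups := by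
  intro row gs _hDom hPre
  unfold Spec_chunk_product_groups chunk_product_groups chunk_product_groups_alt
  rcases lt_trichotomy gs 0 with hneg | hzero | hpos
  · -- negative step: A's range is empty, B's chunk count is zero
    have hr : PySem.List.pyRange 0 (row.length : Int) gs = [] := by
      unfold PySem.List.pyRange
      rw [if_neg hPre, if_neg (by omega), if_neg (by omega)]
      simp
    have ht : gs.toNat = 0 := Int.toNat_of_nonpos hneg.le
    rw [hr, List.foldl_nil, if_neg (by omega), ht, pyChunks_zero]
    simp [PySem.List.enumerate]
  · exact absurd hzero hPre
  · have hn : 0 < gs.toNat := by omega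
    have hl := loop row gs.toNat hn row.length 0 [] (by omega)
    rw [Nat.zero_mul, Nat.cast_zero, List.drop_zero] at hl
    rw [List.nil_append] at hl
    have hcast : gs = ((gs.toNat : Nat) : Int) := (Int.toNat_of_nonneg hpos.le).symm
    by_cases hbig : (row.length : Int) < gs
    · rw [pyChunks_nil (by omega : row.length < gs.toNat)] at hl
      simp only [PySem.List.enumerate, List.filter_nil] at hl
      rw [if_pos hbig, hcast]
      simp only [Int.toNat_natCast]
      exact hl
    · rw [if_neg hbig, hcast]
      simp only [Int.toNat_natCast]
      exact hl
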